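-- pv_equiv track=rewrite | github.com/KazanovLab/ProteolysisStructuralPrediction | scripts/5.extract_features.py | get_len_loop
-- ===== SOURCE A (Python) =====
-- def get_len_loop(SS_type):
--
--     len_loop = []
--     indices_O = []
--     count_O = 0
--     for i, SS in enumerate(SS_type):
--         len_loop.append(0)
--         if SS == 'O':
--             count_O += 1
--             indices_O.append(i)
--         else:
--             for j in indices_O:
--                 len_loop[j] = count_O
--             count_O = 0
--             indices_O = []
--     for j in indices_O: # for C-terminus loop
--         len_loop[j] = count_O
--
--     return len_loop
-- ===== SOURCE B (Python) =====
-- def get_len_loop(SS_type):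
--     out = []
--     i = 0
--     n = len(SS_type)
--     while i < n:
--         j = i
--         while j < n and SS_type[j] == SS_type[i]:
--             j += 1
--         L = j - i
--         out.extend([L] * L if SS_type[i] == 'O' else [0] * L)
--         i = j
--     return out
-- ===== Notes on version B (the rewrite author's own statement) =====
-- stated objective: simpler
-- what changed: B scans each maximal run of equal symbols once (inner while / takeWhile) and emits the whole labelled block directly, instead of A's per-element loop that accumulates an index list of O positions and back-fills it when each run ends.
import Mathlib
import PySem

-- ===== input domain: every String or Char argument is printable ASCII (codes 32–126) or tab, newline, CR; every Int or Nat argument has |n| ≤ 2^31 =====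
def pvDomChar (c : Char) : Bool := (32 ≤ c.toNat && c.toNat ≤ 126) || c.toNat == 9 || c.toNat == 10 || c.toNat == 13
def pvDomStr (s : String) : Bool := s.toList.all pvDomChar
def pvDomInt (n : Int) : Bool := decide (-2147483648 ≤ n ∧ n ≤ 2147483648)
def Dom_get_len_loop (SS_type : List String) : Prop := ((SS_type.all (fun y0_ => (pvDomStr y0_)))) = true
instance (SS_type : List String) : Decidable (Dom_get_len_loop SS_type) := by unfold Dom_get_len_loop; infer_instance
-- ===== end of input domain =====

-- B replaces A's back-filling of an index list by a direct run-by-run scan; objective: simpler.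

-- ===== PORT A =====
-- Python: 'for j in indices_O: len_loop[j] = count_O'  (indices are always valid, List.set is exact there)
def setAll (ll : List Int) (idxs : List Int) (c : Int) : List Int :=
  idxs.foldl (fun acc j => acc.set j.toNat c) ll

def get_len_loop (SS_type : List String) : List Int :=
  let st := (PySem.List.enumerate SS_type).foldl
    (fun (st : List Int × List Int × Int) (p : Int × String) =>
      if p.2 == "O" then (st.1 ++ [0], st.2.1 ++ [p.1], st.2.2 + 1)
      else (setAll (st.1 ++ [0]) st.2.1 st.2.2, [], 0))
    ([], [], 0)
  setAll st.1 st.2.1 st.2.2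

-- ===== PORT B =====
-- Source B scans one maximal run at a time (inner while = takeWhile/dropWhile) and extends the output.
def altGo : List String → List Int
  | [] => []
  | s :: rest =>
    (if s == "O"
      then List.replicate ((rest.takeWhile (fun t => t == s)).length + 1)
             ((((rest.takeWhile (fun t => t == s)).length + 1 : Nat)) : Int)
      else List.replicate ((rest.takeWhile (fun t => t == s)).length + 1) (0 : Int))
      ++ altGo (rest.dropWhile (fun t => t == s))
termination_by l => l.length
decreasing_by simpa using Nat.lt_succ_of_le (List.length_dropWhile_le _ _)

def get_len_loop_alt (SS_type : List String) : List Int := altGo SS_type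

-- ===== PRECONDITION & SPEC =====
def Spec_get_len_loop (SS_type : List String) (out : List Int) : Prop := out = get_len_loop_alt SS_type
instance (SS_type : List String) (out : List Int) : Decidable (Spec_get_len_loop SS_type out) := by unfold Spec_get_len_loop; infer_instance

-- ===== CLAIM (what is proved, stated in full; the proofs are below) =====
def Claim_equal_get_len_loop : Prop := ∀ (SS_type : List String), Dom_get_len_loop SS_type → Spec_get_len_loop SS_type (get_len_loop SS_type)

-- ===== LEMMAS AND PROOFS =====

-- A's loop with the enumerate index replaced by the current length of len_loop
def coreA : List String → List Int × List Int × Int → List Int × List Int × Int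
  | [], st => st
  | s :: ys, st =>
    if s == "O" then coreA ys (st.1 ++ [0], st.2.1 ++ [(st.1.length : Int)], st.2.2 + 1)
    else coreA ys (setAll (st.1 ++ [0]) st.2.1 st.2.2, [], 0)

lemma setAll_length (idxs : List Int) (ll : List Int) (c : Int) :
    (setAll ll idxs c).length = ll.length := by
  induction idxs generalizing ll with
  | nil => rfl
  | cons j js ih => simp only [setAll, List.foldl_cons] at *; rw [ih]; simp

lemma setAll_nil (ll : List Int) (c : Int) : setAll ll [] c = ll := rfl

lemma enum_foldl_eq_coreA (ys : List String) (ll : List Int) (idxs : List Int) (c : Int) :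
    (PySem.List.enumerate ys (ll.length : Int)).foldl
      (fun (st : List Int × List Int × Int) (p : Int × String) =>
        if p.2 == "O" then (st.1 ++ [0], st.2.1 ++ [p.1], st.2.2 + 1)
        else (setAll (st.1 ++ [0]) st.2.1 st.2.2, [], 0))
      (ll, idxs, c) = coreA ys (ll, idxs, c) := by
  induction ys generalizing ll idxs c with
  | nil => simp [PySem.List.enumerate_nil, coreA]
  | cons s ys ih =>
    rw [PySem.List.enumerate_cons, List.foldl_cons]
    simp only [coreA]
    by_cases h : s == "O"
    · simp only [h, if_true]
      have := ih (ll ++ [0]) (idxs ++ [(ll.length : Int)]) (c + 1)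
      simpa using this
    · simp only [h]
      have := ih (setAll (ll ++ [0]) idxs c) [] 0
      rw [setAll_length] at this
      simpa using this

def myRange (n L : Nat) : List Int := (List.range L).map (fun k => ((n + k : Nat) : Int))

lemma myRange_succ (n L : Nat) : myRange n (L + 1) = (n : Int) :: myRange (n + 1) L := by
  simp [myRange, List.range_succ_eq_map, List.map_map]
  intro a _
  omega

lemma coreA_nonO_run (s : String) (hs : (s == "O") = false) (L : Nat) :
    ∀ (zs : List String) (ll : List Int),
      coreA (List.replicate L s ++ zs) (ll, [], 0) = coreA zs (ll ++ List.replicate L 0, [], 0) := by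
  induction L with
  | zero => intro zs ll; simp
  | succ L ih =>
    intro zs ll
    rw [List.replicate_succ, List.cons_append]
    simp only [coreA, hs, Bool.false_eq_true, if_false, setAll_nil]
    rw [ih zs (ll ++ [0])]
    simp [List.replicate_succ]

lemma coreA_O_run (L : Nat) :
    ∀ (zs : List String) (ll : List Int) (idxs : List Int) (c : Int),
      coreA (List.replicate L "O" ++ zs) (ll, idxs, c)
        = coreA zs (ll ++ List.replicate L 0, idxs ++ myRange ll.length L, c + (L : Int)) := by
  induction L with
  | zero => intro zs ll idxs c; simp [myRange]
  | succ L ih =>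
    intro zs ll idxs c
    rw [List.replicate_succ, List.cons_append]
    simp only [coreA, if_true, beq_self_eq_true]
    rw [ih zs (ll ++ [0]) (idxs ++ [(ll.length : Int)]) (c + 1)]
    rw [myRange_succ]
    have h3 : c + 1 + (L : Int) = c + ((L : Int) + 1) := by ring
    simp [List.replicate_succ, List.append_assoc, h3]

lemma setAll_fill (L : Nat) :
    ∀ (ll zs : List Int) (v : Int),
      setAll (ll ++ (List.replicate L 0 ++ zs)) (myRange ll.length L) v
        = ll ++ (List.replicate L v ++ zs) := by
  induction L with
  | zero => intro ll zs v; simp [setAll, myRange]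
  | succ L ih =>
    intro ll zs v
    rw [myRange_succ, List.replicate_succ]
    show setAll ((ll ++ ((0 : Int) :: (List.replicate L 0 ++ zs))).set (Int.toNat ll.length) v)
        (myRange (ll.length + 1) L) v = _
    have hset : (ll ++ ((0 : Int) :: (List.replicate L 0 ++ zs))).set (Int.toNat ll.length) v
        = (ll ++ [v]) ++ (List.replicate L 0 ++ zs) := by
      simp
    rw [hset]
    have := ih (ll ++ [v]) zs v
    simp only [List.length_append, List.length_cons, List.length_nil, Nat.zero_add] at this
    rw [this]
    simp [List.replicate_succ]

lemma dropWhile_head_false {α : Type} (p : α → Bool) :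
    ∀ (l : List α) (t : α) (rest : List α), l.dropWhile p = t :: rest → p t = false := by
  intro l
  induction l with
  | nil => intro t rest h; simp [List.dropWhile] at h
  | cons x xs ih =>
    intro t rest h
    rw [List.dropWhile_cons] at h
    split at h
    · exact ih t rest h
    · cases h; simpa using ‹¬ p x = true›

lemma takeWhile_eq_replicate (rest : List String) (s : String) :
    rest.takeWhile (fun t => t == s)
      = List.replicate (rest.takeWhile (fun t => t == s)).length s := by
  rw [List.eq_replicate_iff]
  refine ⟨rfl, fun b hb => ?_⟩
  have h1 : (b == s) = true := List.mem_takeWhile_imp (p := fun t => t == s) hb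
  exact eq_of_beq h1

lemma coreA_finish : (ys : List String) → ∀ (ll : List Int),
    (let st := coreA ys (ll, [], 0); setAll st.1 st.2.1 st.2.2) = ll ++ altGo ys
  | [] => by intro ll; simp [coreA, setAll, altGo]
  | s :: rest => by
    intro ll
    have hdec : s :: rest
        = List.replicate ((rest.takeWhile (fun t => t == s)).length + 1) s
          ++ rest.dropWhile (fun t => t == s) := by
      rw [List.replicate_succ, List.cons_append]
      conv_lhs => rw [← List.takeWhile_append_dropWhile (p := fun t => t == s) (l := rest)]
      rw [← takeWhile_eq_replicate]
    by_cases hs : (s == "O") = true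
    · have hsO : s = "O" := eq_of_beq hs
      subst hsO
      conv_lhs => rw [hdec]
      rw [coreA_O_run, altGo]
      simp only [beq_self_eq_true, if_true, Int.zero_add]
      cases hd : List.dropWhile (fun t => t == "O") rest with
      | nil =>
        simp only [coreA, List.append_nil, altGo]
        have := setAll_fill ((rest.takeWhile (fun t => t == "O")).length + 1) ll []
          ((((rest.takeWhile (fun t => t == "O")).length + 1 : Nat)) : Int)
        simpa using this
      | cons t rest' =>
        have ht : (t == "O") = false := dropWhile_head_false _ rest t rest' hd
        have hrec := coreA_finish (t :: rest')
          (ll ++ List.replicate ((rest.takeWhile (fun t => t == "O")).length + 1)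
            ((((rest.takeWhile (fun t => t == "O")).length + 1 : Nat)) : Int))
        simp only [coreA, ht, Bool.false_eq_true, if_false, setAll_nil] at hrec ⊢
        have hfill := setAll_fill ((rest.takeWhile (fun t => t == "O")).length + 1) ll [0]
          ((((rest.takeWhile (fun t => t == "O")).length + 1 : Nat)) : Int)
        simp only [List.nil_append, List.append_assoc] at hfill hrec ⊢
        rw [hfill, hrec]
    · have hs' : (s == "O") = false := by simpa using hs
      conv_lhs => rw [hdec]
      rw [coreA_nonO_run s hs' _]
      rw [coreA_finish (rest.dropWhile (fun t => t == s))
        (ll ++ List.replicate ((rest.takeWhile (fun t => t == s)).length + 1) 0)]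
      rw [altGo]
      simp [hs', List.append_assoc]
termination_by ys => ys.length
decreasing_by
  · have hle := List.length_dropWhile_le (fun t => t == "O") rest
    rw [hd] at hle
    simp at hle ⊢
    omega
  · simpa using Nat.lt_succ_of_le (List.length_dropWhile_le _ _)

-- ===== VERDICT (by name: the statement is the Claim_ definition above) =====
theorem get_len_loop_spec : Claim_equal_get_len_loop := by
  intro SS _
  unfold Spec_get_len_loop get_len_loop get_len_loop_alt
  have h := enum_foldl_eq_coreA SS [] [] 0
  simp only [List.length_nil, Nat.cast_zero] at h
  simp only [h]
  simpa using coreA_finish SS []
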